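-- pv_equiv track=rewrite | github.com/witkowskipiotr/Checkio | elementary/three_words.py | three_words
-- ===== SOURCE A (Python) =====
-- def three_words(text: str) -> bool:
--     """
--     In the string we check if there are three words one by one
--     :param text: string to check
--     :return: positive when three words is one by one,
--             negative otherwise
--     """
--     if not text:
--         return False
--     if len(text) > 100:
--         return False
--     nums = "0123456789"
--     number_word_one_by_one = 0
--     divided_text = text.split(" ")
--     for part in divided_text:
--         is_word = True
--         for character in part:
--             if character in nums:
--                 is_word = False
--                 number_word_one_by_one = 0
--         if is_word:
--             number_word_one_by_one += 1
--             if number_word_one_by_one == 3: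
--                 return True
--     return False
-- ===== SOURCE B (Python) =====
-- def three_words(text: str) -> bool:
--     if not text:
--         return False
--     if len(text) > 100:
--         return False
--     pattern = "".join(
--         "X" if any(ch in "0123456789" for ch in part) else "W"
--         for part in text.split(" ")
--     )
--     return "WWW" in pattern
-- ===== Notes on version B (the rewrite author's own statement) =====
-- stated objective: idiomatic
-- what changed: Replaced the incremental consecutive-word counter with building a W/X tag string per token and a single substring search for "WWW".
import Mathlib
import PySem

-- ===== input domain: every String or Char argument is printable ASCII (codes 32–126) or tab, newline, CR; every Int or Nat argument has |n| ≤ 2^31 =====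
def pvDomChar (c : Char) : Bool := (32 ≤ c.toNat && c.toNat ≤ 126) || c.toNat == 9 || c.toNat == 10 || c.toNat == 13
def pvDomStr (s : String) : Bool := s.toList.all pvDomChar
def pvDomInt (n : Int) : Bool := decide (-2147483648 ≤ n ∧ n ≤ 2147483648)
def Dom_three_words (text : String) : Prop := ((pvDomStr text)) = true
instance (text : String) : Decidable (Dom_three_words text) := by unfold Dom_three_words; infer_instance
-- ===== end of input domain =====

-- B builds a W/X tag list per token and does one substring search for "WWW" instead of A's incremental counter.

-- ===== PORT A =====
-- nums = "0123456789"
def twNums : List Char := ['0','1','2','3','4','5','6','7','8','9']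

-- the inner 'for character in part' loop over the state (is_word, number_word_one_by_one)
def twA_part (part : List Char) (st : Bool × Nat) : Bool × Nat :=
  part.foldl (fun st c => if c ∈ twNums then (false, 0) else st) st

-- the outer 'for part in divided_text' loop with its early 'return True'
def twA_loop : List (List Char) → Nat → Bool
  | [], _ => false
  | p :: ps, n =>
    let st := twA_part p (true, n)
    if st.1 then
      (if st.2 + 1 = 3 then true else twA_loop ps (st.2 + 1))
    else twA_loop ps st.2

def three_words (text : String) : Bool :=
  if text = "" then false
  else if PySem.Str.len text > 100 then false
  else twA_loop (PySem.Chars.splitOn text.toList [' ']) 0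

-- ===== PORT B =====
-- tag of one token: 'X' if any character is a digit, else 'W'
def twTag (part : List Char) : Char :=
  if part.any (fun c => c ∈ twNums) then 'X' else 'W'

def three_words_alt (text : String) : Bool :=
  if text = "" then false
  else if PySem.Str.len text > 100 then false
  else
    let pattern := (PySem.Chars.splitOn text.toList [' ']).map twTag
    PySem.Chars.isIn ['W','W','W'] pattern

-- ===== PRECONDITION & SPEC =====
def Spec_three_words (text : String) (out : Bool) : Prop := out = three_words_alt text
instance (text : String) (out : Bool) : Decidable (Spec_three_words text out) := by unfold Spec_three_words; infer_instance

-- ===== CLAIM (what is proved, stated in full; the proofs are below) =====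
def Claim_equal_three_words : Prop := ∀ (text : String), Dom_three_words text → Spec_three_words text (three_words text)

-- ===== LEMMAS AND PROOFS =====

theorem twA_part_eq : ∀ (part : List Char) (b : Bool) (n : Nat),
    twA_part part (b, n) = if part.any (fun c => c ∈ twNums) then (false, 0) else (b, n)
  | [], b, n => by simp [twA_part]
  | c :: cs, b, n => by
    by_cases h : c ∈ twNums
    · have := twA_part_eq cs false 0
      simp [twA_part, h] at this ⊢
      simpa using this
    · have := twA_part_eq cs b n
      simp [twA_part, h] at this ⊢
      exact this

-- prefixes of W's of any length ≤ 2 follow from a ['W','W'] prefix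
theorem rep_prefix_of_WW {rest : List Char} (k : Nat) (hk : k ≤ 2)
    (h : ['W','W'] <+: rest) : List.replicate k 'W' <+: rest := by
  interval_cases k
  · exact List.nil_prefix
  · exact List.IsPrefix.trans (by exact ⟨['W'], rfl⟩) h
  · simpa using h

-- characterisation of A's loop: with counter n ≤ 2, it succeeds iff 3-n more W's
-- open the pattern, or "WWW" occurs anywhere in it
theorem twA_loop_iff (parts : List (List Char)) (n : Nat) (hn : n ≤ 2) :
    twA_loop parts n = true ↔
      (List.replicate (3 - n) 'W' <+: parts.map twTag ∨ ['W','W','W'] <:+: parts.map twTag) := by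
  induction parts generalizing n with
  | nil =>
    simp [twA_loop]
    omega
  | cons p ps ih =>
    by_cases hd : p.any (fun c => c ∈ twNums)
    · -- tag = 'X'
      have htag : twTag p = 'X' := by simp [twTag, hd]
      rw [show twA_loop (p :: ps) n = twA_loop ps 0 by simp [twA_loop, twA_part_eq, hd]]
      simp only [List.map_cons, htag]
      rw [ih 0 (by omega)]
      constructor
      · rintro (h | h)
        · right
          have : ['W','W','W'] <+: List.map twTag ps := by
            simpa using h
          exact List.infix_cons_iff.mpr (Or.inr this.isInfix)
        · right; exact h.trans (List.suffix_cons 'X' _).isInfix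
      · rintro (h | h)
        · exfalso
          obtain ⟨t, ht⟩ := h
          have h3 : 3 - n ≥ 1 := by omega
          cases h30 : 3 - n with
          | zero => omega
          | succ m =>
            rw [h30] at ht
            simp [List.replicate_succ] at ht
        · rcases List.infix_cons_iff.mp h with h1 | h1
          · obtain ⟨t, ht⟩ := h1
            simp at ht
          · right; exact h1
    · -- tag = 'W'
      have htag : twTag p = 'W' := by simp [twTag, hd]
      rw [show twA_loop (p :: ps) n = (if n + 1 = 3 then true else twA_loop ps (n + 1)) by
            simp [twA_loop, twA_part_eq, hd]]
      simp only [List.map_cons, htag]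
      by_cases h3 : n + 1 = 3
      · have hn2 : n = 2 := by omega
        subst hn2
        simp [h3, List.replicate_succ]
      · rw [if_neg h3]
        rw [ih (n + 1) (by omega)]
        have hrep : List.replicate (3 - n) 'W' = 'W' :: List.replicate (3 - (n + 1)) 'W' := by
          have : 3 - n = (3 - (n + 1)) + 1 := by omega
          rw [this, List.replicate_succ]
        constructor
        · rintro (h | h)
          · left; rw [hrep]; exact List.cons_prefix_cons.mpr ⟨rfl, h⟩
          · right; exact h.trans (List.suffix_cons 'W' _).isInfix
        · rintro (h | h)
          · left
            rw [hrep] at h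
            exact (List.cons_prefix_cons.mp h).2
          · rcases List.infix_cons_iff.mp h with h1 | h1
            · left
              have hww : ['W','W'] <+: List.map twTag ps := by
                obtain ⟨t, ht⟩ := h1
                simp at ht
                exact ⟨t, by simpa using ht⟩
              exact rep_prefix_of_WW (3 - (n + 1)) (by omega) hww
            · right; exact h1
-- ===== VERDICT (by name: the statement is the Claim_ definition above) =====
theorem three_words_spec : Claim_equal_three_words := by
  intro text _
  unfold Spec_three_words three_words three_words_alt
  by_cases h0 : text = ""
  · rw [if_pos h0, if_pos h0]
  · rw [if_neg h0, if_neg h0]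
    by_cases h1 : PySem.Str.len text > 100
    · rw [if_pos h1, if_pos h1]
    · rw [if_neg h1, if_neg h1]
      rw [Bool.eq_iff_iff, twA_loop_iff _ 0 (by omega), PySem.Chars.isIn_iff_infix]
      constructor
      · rintro (h | h)
        · simpa using h.isInfix
        · exact h
      · intro h; right; exact h
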